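-- pv_equiv track=rewrite | github.com/XiangLi1999/PosteriorControl-NLG | src/utils.py | vseq_2_vit_lst
-- ===== SOURCE A (Python) =====
-- def vseq_2_vit_lst(z):
--     T = len(z)
--     prev_state = -1
--     idx = 0
--     start = []
--     end = []
--     state = []
--     while (idx < T):
--         if prev_state != z[idx]:
--             state.append(z[idx])
--             if idx - 1 >= 0:
--                 end.append(idx)
--             start.append(idx)
--             prev_state = state[-1]
--         else:
--             idx += 1
--     end.append(T)
--     return [(a,b,c) for (a,b,c) in zip(start, end, state)], (start, end, state)
-- ===== SOURCE B (Python) =====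
-- from itertools import groupby
--
-- def vseq_2_vit_lst(z):
--     start = []
--     state = []
--     off = 0
--     for k, g in groupby(z):
--         start.append(off)
--         state.append(k)
--         off += len(list(g))
--     end = start[1:] + [len(z)]
--     return [(a, b, c) for (a, b, c) in zip(start, end, state)], (start, end, state)
-- ===== Notes on version B (the rewrite author's own statement) =====
-- stated objective: idiomatic
-- what changed: Replaced the index-based while loop (whose boundary branch does not advance the index and replays each position twice) with an itertools.groupby pass over consecutive runs, deriving end as start[1:]+[len(z)].
-- intended difference: On inputs whose first element is -1 (colliding with A's prev_state=-1 sentinel) A silently drops the entire leading run of -1s from start/end/state, e.g. A([-1]) = ([], ([], [1], [])); B reports the leading run like any other, ([(0,1,-1)], ([0],[1],[-1])), which is the intended segmentation. — e.g. on vseq_2_vit_lst([-1]): A returns ([], ([], [1], [])), B returns ([(0, 1, -1)], ([0], [1], [-1]))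
import Mathlib
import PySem

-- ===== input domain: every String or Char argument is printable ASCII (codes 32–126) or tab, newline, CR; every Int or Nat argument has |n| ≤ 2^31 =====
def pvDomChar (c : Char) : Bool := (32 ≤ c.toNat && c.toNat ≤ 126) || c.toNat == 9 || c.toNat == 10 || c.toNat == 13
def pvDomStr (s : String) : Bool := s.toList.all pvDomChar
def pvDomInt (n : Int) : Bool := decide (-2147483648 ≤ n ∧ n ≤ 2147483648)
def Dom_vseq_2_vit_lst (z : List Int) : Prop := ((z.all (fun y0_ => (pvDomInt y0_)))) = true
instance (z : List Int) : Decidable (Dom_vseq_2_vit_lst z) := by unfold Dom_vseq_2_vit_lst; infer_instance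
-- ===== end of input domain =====

-- B segments z with a single groupby-style pass over consecutive runs (idiomatic decomposition);
-- A's index-while-loop with a non-advancing boundary branch is replaced, and end = start[1:] + [len z].

-- ===== PORT A =====
-- While loop of A: the boundary branch records the run and does NOT advance idx
-- (the next iteration then has prev = z[idx] and advances).
def vlLoop (z : List Int) (prev : Int) (idx : Nat) (st en sta : List Int) :
    List Int × List Int × List Int :=
  if h : idx < z.length then
    if prev ≠ z[idx] then
      -- state.append(z[idx]); if idx-1 ≥ 0: end.append(idx); start.append(idx); prev := state[-1]
      vlLoop z (z[idx]) idx (st ++ [(idx : Int)])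
        (if 1 ≤ idx then en ++ [(idx : Int)] else en) (sta ++ [z[idx]])
    else
      vlLoop z prev (idx + 1) st en sta
  else (st, en, sta)
termination_by 2 * (z.length - idx) + (if z[idx]? = some prev then 0 else 1)
decreasing_by
  · have hg : z[idx]? = some z[idx] := List.getElem?_eq_getElem h
    simp [hg]
    split <;> omega
  · have hg : z[idx]? = some z[idx] := List.getElem?_eq_getElem h
    simp [hg]
    split <;> omega

def vseq_2_vit_lst (z : List Int) :
    (List (Int × Int × Int)) × (List Int × List Int × List Int) :=
  let T : Int := z.length
  let r := vlLoop z (-1) 0 [] [] []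
  let start := r.1
  let en := r.2.1 ++ [T]
  let state := r.2.2
  ((start.zip (en.zip state)).map (fun p => (p.1, p.2.1, p.2.2)), (start, en, state))

-- ===== PORT B =====
-- countRun x xs = (length of the leading prefix of xs equal to x, the remainder)
def countRun (x : Int) : List Int → Nat × List Int
  | [] => (0, [])
  | y :: ys => if y = x then let p := countRun x ys; (p.1 + 1, p.2) else (0, y :: ys)

theorem countRun_len (x : Int) : ∀ xs : List Int, (countRun x xs).2.length ≤ xs.length := by
  intro xs
  induction xs with
  | nil => simp [countRun]
  | cons y ys ih => by_cases h : y = x <;> simp [countRun, h] <;> omega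

-- itertools.groupby: list of (key, run length) of the consecutive runs
def groupRuns : List Int → List (Int × Nat)
  | [] => []
  | x :: xs =>
    (x, (countRun x xs).1 + 1) :: groupRuns (countRun x xs).2
termination_by l => l.length
decreasing_by
  have := countRun_len x xs
  simp; omega

-- the for-loop of B: accumulate start offsets and keys, advancing off by each run length
def bLoop (acc : List Int × List Int) (off : Int) : List (Int × Nat) → List Int × List Int
  | [] => acc
  | (k, n) :: rs => bLoop (acc.1 ++ [off], acc.2 ++ [k]) (off + (n : Int)) rs

def vseq_2_vit_lst_alt (z : List Int) :
    (List (Int × Int × Int)) × (List Int × List Int × List Int) :=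
  let p := bLoop ([], []) 0 (groupRuns z)
  let start := p.1
  let state := p.2
  let en := start.drop 1 ++ [(z.length : Int)]
  ((start.zip (en.zip state)).map (fun q => (q.1, q.2.1, q.2.2)), (start, en, state))

-- ===== PRECONDITION & SPEC =====
-- On inputs whose first element is -1 (colliding with A's prev_state = -1 sentinel) A silently
-- drops the entire leading run of -1s; B reports it like any other run, the intended segmentation.
def D_vseq_2_vit_lst (z : List Int) : Prop := z.head? = some (-1)
instance (z : List Int) : Decidable (D_vseq_2_vit_lst z) := by unfold D_vseq_2_vit_lst; infer_instance

def Spec_vseq_2_vit_lst (z : List Int) (out : (List (Int × Int × Int)) × (List Int × List Int × List Int)) : Prop := ¬ D_vseq_2_vit_lst z → out = vseq_2_vit_lst_alt z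
instance (z : List Int) (out : (List (Int × Int × Int)) × (List Int × List Int × List Int)) : Decidable (Spec_vseq_2_vit_lst z out) := by unfold Spec_vseq_2_vit_lst; infer_instance

def pvDiffWitness_vseq_2_vit_lst : List Int := [-1]
def pvDiffWitnessOut_vseq_2_vit_lst :
    ((List (Int × Int × Int)) × (List Int × List Int × List Int)) ×
    ((List (Int × Int × Int)) × (List Int × List Int × List Int)) :=
  (([], ([], [1], [])), ([(0, 1, -1)], ([0], [1], [-1])))

-- ===== CLAIM =====
def Claim_unchanged_vseq_2_vit_lst : Prop := ∀ (z : List Int), Dom_vseq_2_vit_lst z → Spec_vseq_2_vit_lst z (vseq_2_vit_lst z)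
def Claim_changed_vseq_2_vit_lst : Prop := Dom_vseq_2_vit_lst (pvDiffWitness_vseq_2_vit_lst) ∧ D_vseq_2_vit_lst (pvDiffWitness_vseq_2_vit_lst) ∧ vseq_2_vit_lst (pvDiffWitness_vseq_2_vit_lst) = pvDiffWitnessOut_vseq_2_vit_lst.1 ∧ vseq_2_vit_lst_alt (pvDiffWitness_vseq_2_vit_lst) = pvDiffWitnessOut_vseq_2_vit_lst.2 ∧ pvDiffWitnessOut_vseq_2_vit_lst.1 ≠ pvDiffWitnessOut_vseq_2_vit_lst.2
def Claim_exact_vseq_2_vit_lst : Prop := ∀ (z : List Int), Dom_vseq_2_vit_lst z → D_vseq_2_vit_lst z → vseq_2_vit_lst z ≠ vseq_2_vit_lst_alt z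

-- ===== LEMMAS AND PROOFS =====

-- structural model of A's while loop (consumes the suffix of z; boundary branch merged with its
-- immediately following advancing step)
def modelLoop (prev : Int) (pos : Nat) :
    List Int → List Int × List Int × List Int → List Int × List Int × List Int
  | [], acc => acc
  | x :: xs, (st, en, sta) =>
    if prev ≠ x then
      modelLoop x (pos + 1) xs
        (st ++ [(pos : Int)], (if 1 ≤ pos then en ++ [(pos : Int)] else en), sta ++ [x])
    else
      modelLoop prev (pos + 1) xs (st, en, sta)

-- run-structure spec functions
def rStarts (off : Int) : List (Int × Nat) → List Int
  | [] => []
  | (_, n) :: rs => off :: rStarts (off + (n : Int)) rs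

def rKeys : List (Int × Nat) → List Int
  | [] => []
  | (k, _) :: rs => k :: rKeys rs

theorem bLoop_eq (rs : List (Int × Nat)) : ∀ (s k : List Int) (off : Int),
    bLoop (s, k) off rs = (s ++ rStarts off rs, k ++ rKeys rs) := by
  induction rs with
  | nil => intro s k off; simp [bLoop, rStarts, rKeys]
  | cons p rs ih =>
    intro s k off
    obtain ⟨kk, n⟩ := p
    simp [bLoop, rStarts, rKeys, ih]

theorem vlLoop_eq_model (z : List Int) (prev : Int) (idx : Nat) (st en sta : List Int) :
    vlLoop z prev idx st en sta = modelLoop prev idx (z.drop idx) (st, en, sta) := by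
  induction prev, idx, st, en, sta using vlLoop.induct z with
  | case1 prev idx st en sta h hne ih =>
    rw [vlLoop]
    have hd : z.drop idx = z[idx] :: z.drop (idx + 1) := List.drop_eq_getElem_cons h
    simp only [dite_eq_ite] at ih
    rw [dif_pos h, if_pos hne, ih, hd]
    simp [modelLoop, hne]
  | case2 prev idx st en sta h hne ih =>
    rw [vlLoop]
    have hd : z.drop idx = z[idx] :: z.drop (idx + 1) := List.drop_eq_getElem_cons h
    rw [dif_pos h, if_neg hne, ih, hd]
    simp at hne
    simp [modelLoop, hne]
  | case3 prev idx st en sta h =>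
    rw [vlLoop]
    have : z.drop idx = [] := List.drop_eq_nil_of_le (by omega)
    simp [dif_neg h, this, modelLoop]
theorem countRun_skip (x : Int) : ∀ (xs : List Int) (pos : Nat) (acc : List Int × List Int × List Int),
    modelLoop x pos xs acc = modelLoop x (pos + (countRun x xs).1) (countRun x xs).2 acc := by
  intro xs
  induction xs with
  | nil => intro pos acc; simp [countRun]
  | cons y ys ih =>
    intro pos acc
    by_cases h : y = x
    · subst h
      obtain ⟨st, en, sta⟩ := acc
      rw [modelLoop, if_neg (by simp)]
      rw [ih]
      simp [countRun]
      congr 1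
      omega
    · simp [countRun, h]

theorem countRun_head (x : Int) : ∀ xs : List Int, (countRun x xs).2.head? ≠ some x := by
  intro xs
  induction xs with
  | nil => simp [countRun]
  | cons y ys ih => by_cases h : y = x
                    · simpa [countRun, h] using ih
                    · simp [countRun, h]

theorem modelLoop_runs : ∀ (l : List Int) (prev : Int) (pos : Nat) (st en sta : List Int),
    l.head? ≠ some prev →
    modelLoop prev pos l (st, en, sta) =
      (st ++ rStarts (pos : Int) (groupRuns l),
       en ++ (if pos = 0 then (rStarts (pos : Int) (groupRuns l)).drop 1
              else rStarts (pos : Int) (groupRuns l)),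
       sta ++ rKeys (groupRuns l)) := by
  intro l
  induction l using groupRuns.induct with
  | case1 =>
    intro prev pos st en sta _
    simp [modelLoop, groupRuns, rStarts, rKeys]
  | case2 x xs ih =>
    intro prev pos st en sta hh
    have hne : prev ≠ x := by
      intro he; exact hh (by simp [he])
    rw [modelLoop, if_pos hne]
    rw [countRun_skip x xs]
    rw [ih _ _ _ _ _ (countRun_head x xs)]
    rw [groupRuns]
    simp only [rStarts, rKeys]
    have hoff : ((pos + 1 + (countRun x xs).1 : Nat) : Int) = (pos : Int) + (((countRun x xs).1 : Nat) + 1 : Nat) := by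
      push_cast; ring
    rw [if_neg (show ¬(pos + 1 + (countRun x xs).1 = 0) by omega), hoff]
    by_cases hp : pos = 0
    · subst hp; simp
    · rw [if_neg hp, if_pos (show 1 ≤ pos by omega)]
      simp
theorem rStarts_head (off : Int) (rs : List (Int × Nat)) :
    (rStarts off rs).head? = none ∨ (rStarts off rs).head? = some off := by
  cases rs with
  | nil => left; simp [rStarts]
  | cons p rs => right; obtain ⟨k, n⟩ := p; simp [rStarts]

theorem altChar (z : List Int) :
    vseq_2_vit_lst_alt z =
      (((rStarts 0 (groupRuns z)).zip
          ((((rStarts 0 (groupRuns z)).drop 1 ++ [(z.length : Int)]).zip (rKeys (groupRuns z))))).map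
            (fun q => (q.1, q.2.1, q.2.2)),
       (rStarts 0 (groupRuns z),
        (rStarts 0 (groupRuns z)).drop 1 ++ [(z.length : Int)],
        rKeys (groupRuns z))) := by
  unfold vseq_2_vit_lst_alt
  rw [bLoop_eq]
  simp

-- ===== VERDICT =====
theorem vseq_2_vit_lst_spec : Claim_unchanged_vseq_2_vit_lst := by
  intro z _ hD
  unfold D_vseq_2_vit_lst at hD
  unfold vseq_2_vit_lst
  rw [vlLoop_eq_model]
  simp only [List.drop_zero]
  rw [modelLoop_runs z (-1) 0 [] [] [] (by intro h; exact hD h)]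
  rw [altChar]
  simp
theorem vseq_2_vit_lst_changed : Claim_changed_vseq_2_vit_lst := by
  unfold Claim_changed_vseq_2_vit_lst
  refine ⟨by decide, by decide, ?_, ?_, by decide⟩
  · show vseq_2_vit_lst [-1] = ([], ([], [1], []))
    unfold vseq_2_vit_lst
    rw [vlLoop_eq_model]
    simp [modelLoop]
  · show vseq_2_vit_lst_alt [-1] = ([(0, 1, -1)], ([0], [1], [-1]))
    rw [altChar]
    simp [groupRuns, countRun, rStarts, rKeys]

theorem vseq_2_vit_lst_tight : Claim_exact_vseq_2_vit_lst := by
  intro z _ hD heq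
  unfold D_vseq_2_vit_lst at hD
  cases z with
  | nil => simp at hD
  | cons x xs =>
    have hx : x = -1 := by simpa using hD
    subst hx
    have hA : (vseq_2_vit_lst ((-1) :: xs)).2.1 =
        rStarts ((0 + 1 + (countRun (-1) xs).1 : Nat) : Int) (groupRuns (countRun (-1) xs).2) := by
      unfold vseq_2_vit_lst
      rw [vlLoop_eq_model]
      simp only [List.drop_zero]
      rw [modelLoop, if_neg (by simp)]
      rw [countRun_skip]
      rw [modelLoop_runs _ _ _ _ _ _ (countRun_head (-1) xs)]
      simp
    have hB : (vseq_2_vit_lst_alt ((-1) :: xs)).2.1.head? = some 0 := by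
      rw [altChar]
      rw [groupRuns]
      simp [rStarts]
    have hAB : (vseq_2_vit_lst ((-1) :: xs)).2.1.head? = some 0 := by rw [heq]; exact hB
    rw [hA] at hAB
    rcases rStarts_head ((0 + 1 + (countRun (-1) xs).1 : Nat) : Int) (groupRuns (countRun (-1) xs).2) with h | h
    · rw [h] at hAB; simp at hAB
    · rw [h] at hAB
      simp at hAB
      omega
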